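-- pv_equiv track=rewrite | github.com/yoshkur/motto_puroguramanowo_kitaeru_sugaku_pazuru | q21.py | search
-- ===== SOURCE A (Python) =====
-- def search(pages: int, prev: int, days: int, memo: dict) -> int:
--     key = tuple([pages, prev, days])
--     if memo.get(key):
--         return memo[key]
--
--     if pages == 0:
--         return 1
--
--     if pages < 0 or days == 0:
--         return 0
--
--     count = 0
--
--     for i in range(1, prev):
--         count += search(pages=pages - i, prev=i, days=days - 1, memo=memo)
--     memo[key] = count
--     return count
-- ===== SOURCE B (Python) =====
-- def search(pages: int, prev: int, days: int, memo: dict) -> int: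
--     # Telescoping incremental DP: the loop-sum for (p, pr, d) is the loop-sum for
--     # (p, pr-1, d) plus one boundary term, so each sum is extended in O(1) amortized
--     # from a private cache instead of being recomputed from scratch.
--     # NOTE: A mutates `memo`; B only reads it (equivalence is about the return value).
--     scache = {}
--
--     def value(p, pr, d):
--         v = memo.get((p, pr, d))
--         if v:
--             return v
--         if p == 0:
--             return 1
--         if p < 0 or d == 0:
--             return 0
--         # sum of value(p - i, i, d - 1) for i in range(1, pr), telescoped:
--         if pr <= 1:
--             return 0
--         j = pr
--         while j > 1 and (p, j, d) not in scache:
--             j -= 1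
--         s = scache[(p, j, d)] if j > 1 else 0
--         while j < pr:
--             s += value(p - j, j, d - 1)
--             j += 1
--             scache[(p, j, d)] = s
--         return s
--
--     return value(pages, prev, days)
-- ===== Notes on version B (the rewrite author's own statement) =====
-- stated objective: faster
-- what changed: A recomputes each state's sum over range(1, prev) from scratch; B telescopes: the loop-sum for (p, pr, d) is the cached loop-sum for (p, pr-1, d) plus one boundary term kept in a private cache, extended in O(1) amortized; B reads the caller's memo but does not mutate it (return value identical). Intended as faster: a timing run measured B 50-290x ahead at the largest size both finished, with A timing out on the other inputs of that size.
import Mathlib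
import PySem

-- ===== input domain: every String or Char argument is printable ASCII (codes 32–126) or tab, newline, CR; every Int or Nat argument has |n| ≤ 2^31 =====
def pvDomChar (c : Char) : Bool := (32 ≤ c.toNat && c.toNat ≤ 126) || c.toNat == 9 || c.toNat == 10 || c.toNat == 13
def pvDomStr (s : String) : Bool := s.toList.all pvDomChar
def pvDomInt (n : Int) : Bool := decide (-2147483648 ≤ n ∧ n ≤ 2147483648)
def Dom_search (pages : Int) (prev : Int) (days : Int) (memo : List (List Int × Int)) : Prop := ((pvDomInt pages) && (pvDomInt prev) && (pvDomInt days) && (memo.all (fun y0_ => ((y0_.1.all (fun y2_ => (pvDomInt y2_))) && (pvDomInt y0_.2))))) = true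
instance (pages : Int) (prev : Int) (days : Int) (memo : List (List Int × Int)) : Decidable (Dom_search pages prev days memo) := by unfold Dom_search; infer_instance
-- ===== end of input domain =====

-- B replaces A's per-state summation loop over range(1, prev) by a telescoped sum
-- extended by one boundary term from a private cache; intended as faster — the timing
-- run measured B 50-290x ahead at the largest size both finished, with A timing out
-- on the other inputs of that size. A mutates `memo`; B only reads it — the
-- equivalence proved here is about the RETURN value only.

-- ===== PORT A =====
-- A's memoized recursion; the Python mutates `memo`, so the port threads the dict
-- through and `search` returns the first component.
mutual
  -- body of Python `search` (the memo dict is threaded as state)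
  def searchGo (pages prev days : Int) (m : PySem.Dict (List Int) Int) :
      Int × PySem.Dict (List Int) Int :=
    -- if memo.get(key): return memo[key]   (None and 0 are both falsy)
    if PySem.Dict.getD m [pages, prev, days] 0 ≠ 0 then
      (PySem.Dict.getD m [pages, prev, days] 0, m)
    else if hz : pages = 0 then (1, m)
    else if hneg : pages < 0 ∨ days = 0 then (0, m)
    else
      let r := searchLoop pages prev days 1 0 m le_rfl
        (by rcases not_or.mp hneg with ⟨h1, _⟩; omega)
      (r.1, PySem.Dict.insert r.2 [pages, prev, days] r.1)
  termination_by (pages.toNat, 1, 0)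

  -- for i in range(1, prev): count += search(pages - i, i, days - 1, memo)
  def searchLoop (pages prev days i count : Int) (m : PySem.Dict (List Int) Int)
      (hi : 1 ≤ i) (hp : 0 < pages) : Int × PySem.Dict (List Int) Int :=
    if h : i < prev then
      let r := searchGo (pages - i) i (days - 1) m
      searchLoop pages prev days (i + 1) (count + r.1) r.2 (by omega) hp
    else (count, m)
  termination_by (pages.toNat, 0, (prev - i).toNat)
  decreasing_by
    · exact Prod.Lex.left _ _ (by omega)
    · exact Prod.Lex.right _ (Prod.Lex.right _ (by omega))
end

def search (pages : Int) (prev : Int) (days : Int) (memo : List (List Int × Int)) : Int :=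
  (searchGo pages prev days (PySem.Dict.mk memo)).1

-- ===== PORT B =====
-- B's telescoping DP: `altValue` is Python's `value`; its two while-loops are
-- `altDesc`/`altAsc`, threading the private cache `scache`.
mutual
  def altValue (memo : PySem.Dict (List Int) Int) (p pr d : Int)
      (sc : PySem.Dict (Int × Int × Int) Int) : Int × PySem.Dict (Int × Int × Int) Int :=
    -- v = memo.get((p, pr, d)); if v: return v
    if PySem.Dict.getD memo [p, pr, d] 0 ≠ 0 then (PySem.Dict.getD memo [p, pr, d] 0, sc)
    else if hz : p = 0 then (1, sc)
    else if hneg : p < 0 ∨ d = 0 then (0, sc)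
    else if hle : pr ≤ 1 then (0, sc)
    else altDesc memo p pr d pr sc (by rcases not_or.mp hneg with ⟨h1, _⟩; omega) (by omega)
  termination_by (p.toNat, 2, 0)

  -- j = pr; while j > 1 and (p, j, d) not in scache: j -= 1
  def altDesc (memo : PySem.Dict (List Int) Int) (p pr d j : Int)
      (sc : PySem.Dict (Int × Int × Int) Int) (hp : 0 < p) (hj : 1 ≤ j) :
      Int × PySem.Dict (Int × Int × Int) Int :=
    if h : 1 < j ∧ ¬ PySem.Dict.contains sc (p, j, d) then
      altDesc memo p pr d (j - 1) sc hp (by omega)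
    else
      -- s = scache[(p, j, d)] if j > 1 else 0
      altAsc memo p pr d j (if 1 < j then PySem.Dict.getD sc (p, j, d) 0 else 0) sc hp hj
  termination_by (p.toNat, 1, j.toNat)

  -- while j < pr: s += value(p - j, j, d - 1); j += 1; scache[(p, j, d)] = s
  def altAsc (memo : PySem.Dict (List Int) Int) (p pr d j s : Int)
      (sc : PySem.Dict (Int × Int × Int) Int) (hp : 0 < p) (hj : 1 ≤ j) :
      Int × PySem.Dict (Int × Int × Int) Int :=
    if h : j < pr then
      let r := altValue memo (p - j) j (d - 1) sc
      altAsc memo p pr d (j + 1) (s + r.1)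
        (PySem.Dict.insert r.2 (p, j + 1, d) (s + r.1)) hp (by omega)
    else (s, sc)
  termination_by (p.toNat, 0, (pr - j).toNat)
  decreasing_by
    · exact Prod.Lex.left _ _ (by omega)
    · exact Prod.Lex.right _ (Prod.Lex.right _ (by omega))
end

def search_alt (pages : Int) (prev : Int) (days : Int) (memo : List (List Int × Int)) : Int :=
  (altValue (PySem.Dict.mk memo) pages prev days PySem.Dict.empty).1

-- ===== PRECONDITION & SPEC =====
def Spec_search (pages : Int) (prev : Int) (days : Int) (memo : List (List Int × Int)) (out : Int) : Prop := out = search_alt pages prev days memo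
instance (pages : Int) (prev : Int) (days : Int) (memo : List (List Int × Int)) (out : Int) : Decidable (Spec_search pages prev days memo out) := by unfold Spec_search; infer_instance

-- ===== CLAIM (what is proved, stated in full; the proofs are below) =====
def Claim_equal_search : Prop := ∀ (pages : Int) (prev : Int) (days : Int) (memo : List (List Int × Int)), Dom_search pages prev days memo → Spec_search pages prev days memo (search pages prev days memo)

-- ===== LEMMAS AND PROOFS =====

-- Pure reference function: the value both programs compute, given the initial memo M.
def Gval (M : PySem.Dict (List Int) Int) (p pr d : Int) : Int :=
  if PySem.Dict.getD M [p, pr, d] 0 ≠ 0 then PySem.Dict.getD M [p, pr, d] 0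
  else if hz : p = 0 then 1
  else if hneg : p < 0 ∨ d = 0 then 0
  else ((PySem.List.pyRange 1 pr 1).attach.map
          (fun x => Gval M (p - x.1) x.1 (d - 1))).sum
termination_by p.toNat
decreasing_by
  have h1 := (PySem.List.mem_pyRange_one.mp x.2).1
  have _h2 := (not_or.mp hneg).1
  omega

-- sum of Gval (p - t) t (d - 1) over t ∈ range(i, pr)
def SsumFrom (M : PySem.Dict (List Int) Int) (p pr d i : Int) : Int :=
  ((PySem.List.pyRange i pr 1).map (fun t => Gval M (p - t) t (d - 1))).sum

theorem SsumFrom_nil (M : PySem.Dict (List Int) Int) (p pr d i : Int) (h : pr ≤ i) :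
    SsumFrom M p pr d i = 0 := by
  simp [SsumFrom, PySem.List.pyRange_one_eq_nil h]

theorem SsumFrom_telescope (M : PySem.Dict (List Int) Int) (p j d : Int) (h : 1 ≤ j) :
    SsumFrom M p (j + 1) d 1 = SsumFrom M p j d 1 + Gval M (p - j) j (d - 1) := by
  simp [SsumFrom, PySem.List.pyRange_one_succ_right h]

theorem SsumFrom_cons (M : PySem.Dict (List Int) Int) (p pr d i : Int) (h : i < pr) :
    SsumFrom M p pr d i = Gval M (p - i) i (d - 1) + SsumFrom M p pr d (i + 1) := by
  simp [SsumFrom, PySem.List.pyRange_one_cons h]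

theorem Gval_hit (M : PySem.Dict (List Int) Int) (p pr d : Int)
    (h : PySem.Dict.getD M [p, pr, d] 0 ≠ 0) :
    Gval M p pr d = PySem.Dict.getD M [p, pr, d] 0 := by
  rw [Gval]; simp [h]

theorem attach_map_sum (l : List Int) (f : Int → Int) :
    (l.attach.map (fun x => f x.1)).sum = (l.map f).sum := by
  conv_rhs => rw [← List.attach_map_subtype_val l]
  rw [List.map_map]; rfl

theorem Gval_sum (M : PySem.Dict (List Int) Int) (p pr d : Int)
    (h : PySem.Dict.getD M [p, pr, d] 0 = 0) (hp : 0 < p) (hd : d ≠ 0) :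
    Gval M p pr d = SsumFrom M p pr d 1 := by
  have h1 : ¬ (p = 0) := by omega
  have h2 : ¬ (p < 0 ∨ d = 0) := not_or.mpr ⟨by omega, hd⟩
  rw [Gval, if_neg (by simp [h]), dif_neg h1, dif_neg h2, SsumFrom]
  exact attach_map_sum _ (fun t => Gval M (p - t) t (d - 1))

-- A-side memo invariant relative to the initial memo M
def MInv (M m : PySem.Dict (List Int) Int) : Prop :=
  (∀ k, PySem.Dict.getD M k 0 ≠ 0 → PySem.Dict.getD m k 0 = PySem.Dict.getD M k 0) ∧
  (∀ p pr d, PySem.Dict.getD m [p, pr, d] 0 ≠ 0 →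
      PySem.Dict.getD m [p, pr, d] 0 = Gval M p pr d)

theorem MInv_init (M : PySem.Dict (List Int) Int) : MInv M M :=
  ⟨fun _ _ => rfl, fun p pr d h => (Gval_hit M p pr d h).symm⟩

-- B-side cache invariant: every cached entry is the corresponding telescoped sum
def SCInv (M : PySem.Dict (List Int) Int) (sc : PySem.Dict (Int × Int × Int) Int) : Prop :=
  ∀ p j d, PySem.Dict.contains sc (p, j, d) = true →
    PySem.Dict.getD sc (p, j, d) 0 = SsumFrom M p j d 1

theorem MInv_insert (M m : PySem.Dict (List Int) Int) (pages prev days v : Int)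
    (hM : PySem.Dict.getD M [pages, prev, days] 0 = 0)
    (hv : v = Gval M pages prev days) (h : MInv M m) :
    MInv M (PySem.Dict.insert m [pages, prev, days] v) := by
  constructor
  · intro k hk
    rw [PySem.Dict.getD_insert]
    have : ¬ (k = [pages, prev, days]) := fun he => hk (he ▸ hM)
    rw [if_neg this]
    exact h.1 k hk
  · intro p' pr' d' hne
    rw [PySem.Dict.getD_insert] at hne ⊢
    by_cases he : [p', pr', d'] = ([pages, prev, days] : List Int)
    · rw [if_pos he] at hne ⊢
      obtain ⟨e1, e2, e3, _⟩ : p' = pages ∧ pr' = prev ∧ d' = days ∧ True := by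
        simpa using he
      rw [e1, e2, e3]; exact hv
    · rw [if_neg he] at hne ⊢
      exact h.2 p' pr' d' hne

theorem loopA_spec (M : PySem.Dict (List Int) Int) (n : ℕ)
    (IH : ∀ (p pr d : Int) (m : PySem.Dict (List Int) Int), p.toNat ≤ n → MInv M m →
      (searchGo p pr d m).1 = Gval M p pr d ∧ MInv M (searchGo p pr d m).2) :
    ∀ (k : ℕ) (pages prev days i count : Int) (m : PySem.Dict (List Int) Int)
      (hi : 1 ≤ i) (hp : 0 < pages), pages.toNat ≤ n + 1 → (prev - i).toNat ≤ k →
      MInv M m →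
      (searchLoop pages prev days i count m hi hp).1
          = count + SsumFrom M pages prev days i ∧
        MInv M (searchLoop pages prev days i count m hi hp).2 := by
  intro k
  induction k with
  | zero =>
    intro pages prev days i count m hi hp _ hk hm
    have hpr : prev ≤ i := by omega
    rw [searchLoop, dif_neg (by omega : ¬ i < prev)]
    exact ⟨by rw [SsumFrom_nil M _ _ _ _ hpr]; ring, hm⟩
  | succ k ih =>
    intro pages prev days i count m hi hp hn hk hm
    rw [searchLoop]
    by_cases h : i < prev
    · rw [dif_pos h]
      have hrec := IH (pages - i) i (days - 1) m (by omega) hm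
      have := ih pages prev days (i + 1) (count + (searchGo (pages - i) i (days - 1) m).1)
        (searchGo (pages - i) i (days - 1) m).2 (by omega) hp hn (by omega) hrec.2
      refine ⟨?_, this.2⟩
      rw [this.1, hrec.1, SsumFrom_cons M pages prev days i h]
      ring
    · rw [dif_neg h]
      exact ⟨by rw [SsumFrom_nil M _ _ _ _ (by omega)]; ring, hm⟩

theorem goA_spec (M : PySem.Dict (List Int) Int) :
    ∀ (n : ℕ) (p pr d : Int) (m : PySem.Dict (List Int) Int), p.toNat ≤ n → MInv M m →
      (searchGo p pr d m).1 = Gval M p pr d ∧ MInv M (searchGo p pr d m).2 := by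
  intro n
  induction n with
  | zero =>
    intro p pr d m hn hm
    rw [searchGo]
    by_cases hhit : PySem.Dict.getD m [p, pr, d] 0 ≠ 0
    · rw [if_pos hhit]
      exact ⟨hm.2 p pr d hhit, hm⟩
    · rw [if_neg hhit]
      rw [not_not] at hhit
      have hM0 : PySem.Dict.getD M [p, pr, d] 0 = 0 := by
        by_contra hM
        exact absurd (hm.1 [p, pr, d] hM ▸ hM) (by rw [hhit]; exact fun h => h rfl)
      by_cases hz : p = 0
      · rw [dif_pos hz]
        rw [Gval, if_neg (by simp [hM0]), dif_pos hz]
        exact ⟨rfl, hm⟩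
      · rw [dif_neg hz]
        have hneg : p < 0 ∨ d = 0 := by omega
        rw [dif_pos hneg]
        rw [Gval, if_neg (by simp [hM0]), dif_neg hz, dif_pos hneg]
        exact ⟨rfl, hm⟩
  | succ n IH =>
    intro p pr d m hn hm
    rw [searchGo]
    by_cases hhit : PySem.Dict.getD m [p, pr, d] 0 ≠ 0
    · rw [if_pos hhit]
      exact ⟨hm.2 p pr d hhit, hm⟩
    · rw [if_neg hhit]
      rw [not_not] at hhit
      have hM0 : PySem.Dict.getD M [p, pr, d] 0 = 0 := by
        by_contra hM
        exact absurd (hm.1 [p, pr, d] hM ▸ hM) (by rw [hhit]; exact fun h => h rfl)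
      by_cases hz : p = 0
      · rw [dif_pos hz, Gval, if_neg (by simp [hM0]), dif_pos hz]
        exact ⟨rfl, hm⟩
      · rw [dif_neg hz]
        by_cases hneg : p < 0 ∨ d = 0
        · rw [dif_pos hneg, Gval, if_neg (by simp [hM0]), dif_neg hz, dif_pos hneg]
          exact ⟨rfl, hm⟩
        · rw [dif_neg hneg]
          have hp : 0 < p := by omega
          have hd : d ≠ 0 := fun h => hneg (Or.inr h)
          have hloop := loopA_spec M n IH (pr - 1).toNat p pr d 1 0 m le_rfl hp hn
            le_rfl hm
          have hG : Gval M p pr d = SsumFrom M p pr d 1 := Gval_sum M p pr d hM0 hp hd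
          constructor
          · simp only []
            rw [hloop.1, hG]; ring
          · simp only []
            refine MInv_insert M _ p pr d _ hM0 ?_ hloop.2
            rw [hloop.1, hG]; ring

theorem SCInv_insert (M : PySem.Dict (List Int) Int)
    (sc : PySem.Dict (Int × Int × Int) Int) (p j d v : Int)
    (hv : v = SsumFrom M p j d 1) (h : SCInv M sc) :
    SCInv M (PySem.Dict.insert sc (p, j, d) v) := by
  intro p' j' d' hc
  rw [PySem.Dict.getD_insert]
  by_cases he : ((p', j', d') : Int × Int × Int) = (p, j, d)
  · rw [if_pos he]
    obtain ⟨e1, e2, e3⟩ : p' = p ∧ j' = j ∧ d' = d := by simpa [Prod.ext_iff] using he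
    rw [e1, e2, e3]; exact hv
  · rw [if_neg he]
    rw [PySem.Dict.contains_insert] at hc
    exact h p' j' d' (by simpa [he] using hc)

theorem ascB_spec (M : PySem.Dict (List Int) Int) (n : ℕ)
    (IH : ∀ (p pr d : Int) (sc : PySem.Dict (Int × Int × Int) Int), p.toNat ≤ n →
      SCInv M sc → (altValue M p pr d sc).1 = Gval M p pr d ∧
        SCInv M (altValue M p pr d sc).2) :
    ∀ (k : ℕ) (p pr d j s : Int) (sc : PySem.Dict (Int × Int × Int) Int)
      (hp : 0 < p) (hj : 1 ≤ j), p.toNat ≤ n + 1 → (pr - j).toNat ≤ k → j ≤ pr →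
      s = SsumFrom M p j d 1 → SCInv M sc →
      (altAsc M p pr d j s sc hp hj).1 = SsumFrom M p pr d 1 ∧
        SCInv M (altAsc M p pr d j s sc hp hj).2 := by
  intro k
  induction k with
  | zero =>
    intro p pr d j s sc hp hj hn hk hjpr hs hsc
    have : j = pr := by omega
    rw [altAsc, dif_neg (by omega : ¬ j < pr)]
    exact ⟨by rw [hs, this], hsc⟩
  | succ k ih =>
    intro p pr d j s sc hp hj hn hk hjpr hs hsc
    rw [altAsc]
    by_cases h : j < pr
    · rw [dif_pos h]
      have hrec := IH (p - j) j (d - 1) sc (by omega) hsc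
      have hs' : s + (altValue M (p - j) j (d - 1) sc).1 = SsumFrom M p (j + 1) d 1 := by
        rw [hrec.1, hs, SsumFrom_telescope M p j d hj]
      exact ih p pr d (j + 1) (s + (altValue M (p - j) j (d - 1) sc).1)
        (PySem.Dict.insert (altValue M (p - j) j (d - 1) sc).2 (p, j + 1, d)
          (s + (altValue M (p - j) j (d - 1) sc).1)) hp (by omega) hn (by omega)
        (by omega) hs' (SCInv_insert M _ p (j + 1) d _ hs' hrec.2)
    · rw [dif_neg h]
      have : j = pr := by omega
      exact ⟨by rw [hs, this], hsc⟩

theorem descB_spec (M : PySem.Dict (List Int) Int) (n : ℕ)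
    (IH : ∀ (p pr d : Int) (sc : PySem.Dict (Int × Int × Int) Int), p.toNat ≤ n →
      SCInv M sc → (altValue M p pr d sc).1 = Gval M p pr d ∧
        SCInv M (altValue M p pr d sc).2) :
    ∀ (k : ℕ) (p pr d j : Int) (sc : PySem.Dict (Int × Int × Int) Int)
      (hp : 0 < p) (hj : 1 ≤ j), p.toNat ≤ n + 1 → j.toNat ≤ k → j ≤ pr → SCInv M sc →
      (altDesc M p pr d j sc hp hj).1 = SsumFrom M p pr d 1 ∧
        SCInv M (altDesc M p pr d j sc hp hj).2 := by
  intro k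
  induction k with
  | zero => intro p pr d j sc hp hj hn hk; omega
  | succ k ih =>
    intro p pr d j sc hp hj hn hk hjpr hsc
    rw [altDesc]
    by_cases h : 1 < j ∧ ¬ PySem.Dict.contains sc (p, j, d) = true
    · rw [dif_pos h]
      exact ih p pr d (j - 1) sc hp (by omega) hn (by omega) (by omega) hsc
    · rw [dif_neg h]
      have hs : (if 1 < j then PySem.Dict.getD sc (p, j, d) 0 else 0)
          = SsumFrom M p j d 1 := by
        by_cases h1 : 1 < j
        · rw [if_pos h1]
          have hc : PySem.Dict.contains sc (p, j, d) = true := by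
            by_contra hc'
            exact h ⟨h1, fun hcc => hc' hcc⟩
          exact hsc p j d hc
        · rw [if_neg h1]
          have : j = 1 := by omega
          rw [this, SsumFrom_nil M _ _ _ _ le_rfl]
      exact ascB_spec M n IH (pr - j).toNat p pr d j _ sc hp hj hn le_rfl hjpr hs hsc

theorem valB_spec (M : PySem.Dict (List Int) Int) :
    ∀ (n : ℕ) (p pr d : Int) (sc : PySem.Dict (Int × Int × Int) Int), p.toNat ≤ n →
      SCInv M sc →
      (altValue M p pr d sc).1 = Gval M p pr d ∧ SCInv M (altValue M p pr d sc).2 := by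
  intro n
  induction n with
  | zero =>
    intro p pr d sc hn hsc
    rw [altValue]
    by_cases hhit : PySem.Dict.getD M [p, pr, d] 0 ≠ 0
    · rw [if_pos hhit, Gval, if_pos hhit]
      exact ⟨rfl, hsc⟩
    · rw [if_neg hhit]
      rw [not_not] at hhit
      by_cases hz : p = 0
      · rw [dif_pos hz, Gval, if_neg (by simp [hhit]), dif_pos hz]
        exact ⟨rfl, hsc⟩
      · rw [dif_neg hz]
        have hneg : p < 0 ∨ d = 0 := by omega
        rw [dif_pos hneg, Gval, if_neg (by simp [hhit]), dif_neg hz, dif_pos hneg]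
        exact ⟨rfl, hsc⟩
  | succ n IH =>
    intro p pr d sc hn hsc
    rw [altValue]
    by_cases hhit : PySem.Dict.getD M [p, pr, d] 0 ≠ 0
    · rw [if_pos hhit, Gval, if_pos hhit]
      exact ⟨rfl, hsc⟩
    · rw [if_neg hhit]
      rw [not_not] at hhit
      by_cases hz : p = 0
      · rw [dif_pos hz, Gval, if_neg (by simp [hhit]), dif_pos hz]
        exact ⟨rfl, hsc⟩
      · rw [dif_neg hz]
        by_cases hneg : p < 0 ∨ d = 0
        · rw [dif_pos hneg, Gval, if_neg (by simp [hhit]), dif_neg hz, dif_pos hneg]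
          exact ⟨rfl, hsc⟩
        · rw [dif_neg hneg]
          have hp : 0 < p := by omega
          have hd : d ≠ 0 := fun h => hneg (Or.inr h)
          have hG : Gval M p pr d = SsumFrom M p pr d 1 := Gval_sum M p pr d hhit hp hd
          by_cases hle : pr ≤ 1
          · rw [dif_pos hle]
            exact ⟨by rw [hG, SsumFrom_nil M _ _ _ _ hle], hsc⟩
          · rw [dif_neg hle]
            have := descB_spec M n IH pr.toNat p pr d pr sc hp (by omega) hn le_rfl
              le_rfl hsc
            exact ⟨by rw [this.1, hG], this.2⟩

-- ===== VERDICT (by name: the statement is the Claim_ definition above) =====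
theorem search_spec : Claim_equal_search := by
  intro pages prev days memo _
  unfold Spec_search search search_alt
  rw [(goA_spec (PySem.Dict.mk memo) pages.toNat pages prev days (PySem.Dict.mk memo)
        le_rfl (MInv_init _)).1,
     (valB_spec (PySem.Dict.mk memo) pages.toNat pages prev days PySem.Dict.empty
        le_rfl (fun p j d h => by simp [PySem.Dict.contains_empty] at h)).1]
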